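-- pv_equiv track=rewrite | github.com/ABIDHUSSAIN686/Generative-Naive-Bayes-Text-Classifier | Naive_Bayes_Classifier.py | word_class_count
-- ===== SOURCE A (Python) =====
-- def word_class_count(Positive_Dict,Negative_Dict,Neutral_Dict,vocabulary,dataset):
--   # Creating Positive, Negative and Netural class count
--   for sentence in dataset:
--     classes=sentence.split()
--     for words in sentence.split():
--       words=words.replace(".", "")
--       words=words.replace(",", "")
--       if classes[len(sentence.split())-1]=='+' and words!='+':
--         if words not in Positive_Dict:
--           Positive_Dict[words]=1
--         else:
--           Positive_Dict[words]+=1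
--       elif classes[len(sentence.split())-1]=='-' and words!='-':
--         if words not in Negative_Dict:
--           Negative_Dict[words]=1
--         else:
--           Negative_Dict[words]+=1
--       elif classes[len(sentence.split())-1]=='0'and words!='0':
--         if words not in Neutral_Dict:
--           Neutral_Dict[words]=1
--         else:
--           Neutral_Dict[words]+=1
--   return Positive_Dict,Negative_Dict,Neutral_Dict
-- ===== SOURCE B (Python) =====
-- def word_class_count(Positive_Dict, Negative_Dict, Neutral_Dict, vocabulary, dataset):
--     # Three staged passes: for each class symbol, collect the stripped words of
--     # every sentence labeled with that symbol (in dataset order), drop the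
--     # symbol itself, then tally the flat word list into that class's dict.
--     def words_for(sym):
--         collected = []
--         for sentence in dataset:
--             toks = sentence.split()
--             if toks and toks[-1] == sym:
--                 collected.extend(t.replace(".", "").replace(",", "") for t in toks)
--         return [w for w in collected if w != sym]
--
--     def tally(d, ws):
--         for w in ws:
--             d[w] = d.get(w, 0) + 1
--         return d
--
--     return (tally(Positive_Dict, words_for('+')),
--             tally(Negative_Dict, words_for('-')),
--             tally(Neutral_Dict, words_for('0')))
-- ===== Notes on version B (the rewrite author's own statement) =====
-- stated objective: alternative
-- what changed: A makes one interleaved pass, retesting the sentence label and dispatching per word; B is staged: for each of the three class symbols it first materializes the flat list of stripped words of all sentences with that label (dropping the symbol), then tallies that list into the class's dict in a separate pass.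
import Mathlib
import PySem

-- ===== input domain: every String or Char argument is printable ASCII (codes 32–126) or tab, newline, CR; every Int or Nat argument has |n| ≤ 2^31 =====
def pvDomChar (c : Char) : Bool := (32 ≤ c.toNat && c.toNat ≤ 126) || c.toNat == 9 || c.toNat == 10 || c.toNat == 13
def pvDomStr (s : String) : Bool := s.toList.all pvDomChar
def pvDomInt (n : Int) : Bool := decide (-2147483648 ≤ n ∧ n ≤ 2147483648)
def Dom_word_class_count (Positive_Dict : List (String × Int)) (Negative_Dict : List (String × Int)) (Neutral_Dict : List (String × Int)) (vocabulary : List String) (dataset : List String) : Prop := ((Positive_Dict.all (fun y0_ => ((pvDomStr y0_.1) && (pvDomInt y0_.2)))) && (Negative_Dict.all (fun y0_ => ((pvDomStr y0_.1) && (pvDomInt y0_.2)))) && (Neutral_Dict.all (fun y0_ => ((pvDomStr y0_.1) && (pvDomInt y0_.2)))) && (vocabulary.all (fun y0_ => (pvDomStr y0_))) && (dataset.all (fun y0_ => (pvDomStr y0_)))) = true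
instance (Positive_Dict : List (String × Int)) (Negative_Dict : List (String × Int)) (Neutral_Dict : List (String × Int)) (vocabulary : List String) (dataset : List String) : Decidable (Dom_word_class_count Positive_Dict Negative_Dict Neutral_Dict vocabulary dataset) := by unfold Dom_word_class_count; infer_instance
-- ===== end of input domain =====

-- B replaces A's single interleaved per-word dispatch pass with three staged passes
-- (collect each class's labeled, stripped words, then tally them) — objective: alternative.
-- Both Pythons mutate the three dict arguments in place in the same way; the equivalence
-- proved here is about the returned value.

-- shared helper: words.replace(".", "").replace(",", "")
def wccStrip (w : String) : String :=
  PySem.Str.replace (PySem.Str.replace w "." "") "," ""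

-- ===== PORT A =====
-- if words not in D: D[words]=1 else: D[words]+=1   (the lookup in += is guarded by `in`)
def wccIncr (d : PySem.Dict String Int) (w : String) : PySem.Dict String Int :=
  if d.contains w = false then d.insert w 1 else d.insert w (d.getD w 0 + 1)

def wccStepA (classes : List String)
    (st : PySem.Dict String Int × PySem.Dict String Int × PySem.Dict String Int)
    (w0 : String) : PySem.Dict String Int × PySem.Dict String Int × PySem.Dict String Int :=
  let w := wccStrip w0
  -- classes[len(sentence.split())-1]; sentence.split() equals classes. The index is in range
  -- whenever this loop body runs (the loop iterates over classes itself), so `none` is unreachable.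
  let lbl? := PySem.List.pyGet? classes ((classes.length : Int) - 1)
  if lbl? = some "+" ∧ w ≠ "+" then (wccIncr st.1 w, st.2.1, st.2.2)
  else if lbl? = some "-" ∧ w ≠ "-" then (st.1, wccIncr st.2.1 w, st.2.2)
  else if lbl? = some "0" ∧ w ≠ "0" then (st.1, st.2.1, wccIncr st.2.2 w)
  else st

def word_class_count (Positive_Dict : List (String × Int)) (Negative_Dict : List (String × Int)) (Neutral_Dict : List (String × Int)) (vocabulary : List String) (dataset : List String) : (List (String × Int)) × (List (String × Int)) × (List (String × Int)) :=
  let st := dataset.foldl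
    (fun st sentence =>
      (PySem.Str.split₀ sentence).foldl (wccStepA (PySem.Str.split₀ sentence)) st)
    (PySem.Dict.mk Positive_Dict, PySem.Dict.mk Negative_Dict, PySem.Dict.mk Neutral_Dict)
  (st.1.items, st.2.1.items, st.2.2.items)

-- ===== PORT B =====
-- def words_for(sym): collected.extend(stripped tokens of each sym-labeled sentence);
--                     return [w for w in collected if w != sym]
def wccWordsFor (sym : String) (dataset : List String) : List String :=
  (dataset.foldl
    (fun collected sentence =>
      let toks := PySem.Str.split₀ sentence
      if toks ≠ [] ∧ PySem.List.pyGet? toks (-1) = some sym then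
        collected ++ toks.map wccStrip
      else collected)
    []).filter (fun w => w ≠ sym)

-- def tally(d, ws): for w in ws: d[w] = d.get(w, 0) + 1
def wccTally (d : PySem.Dict String Int) (ws : List String) : PySem.Dict String Int :=
  ws.foldl (fun d w => d.insert w (d.getD w 0 + 1)) d

def word_class_count_alt (Positive_Dict : List (String × Int)) (Negative_Dict : List (String × Int)) (Neutral_Dict : List (String × Int)) (vocabulary : List String) (dataset : List String) : (List (String × Int)) × (List (String × Int)) × (List (String × Int)) :=
  ((wccTally (PySem.Dict.mk Positive_Dict) (wccWordsFor "+" dataset)).items,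
   (wccTally (PySem.Dict.mk Negative_Dict) (wccWordsFor "-" dataset)).items,
   (wccTally (PySem.Dict.mk Neutral_Dict) (wccWordsFor "0" dataset)).items)

-- ===== PRECONDITION & SPEC =====
def Spec_word_class_count (Positive_Dict : List (String × Int)) (Negative_Dict : List (String × Int)) (Neutral_Dict : List (String × Int)) (vocabulary : List String) (dataset : List String) (out : (List (String × Int)) × (List (String × Int)) × (List (String × Int))) : Prop := out = word_class_count_alt Positive_Dict Negative_Dict Neutral_Dict vocabulary dataset
instance (Positive_Dict : List (String × Int)) (Negative_Dict : List (String × Int)) (Neutral_Dict : List (String × Int)) (vocabulary : List String) (dataset : List String) (out : (List (String × Int)) × (List (String × Int)) × (List (String × Int))) : Decidable (Spec_word_class_count Positive_Dict Negative_Dict Neutral_Dict vocabulary dataset out) := by unfold Spec_word_class_count; infer_instance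

-- ===== CLAIM (what is proved, stated in full; the proofs are below) =====
def Claim_equal_word_class_count : Prop := ∀ (Positive_Dict : List (String × Int)) (Negative_Dict : List (String × Int)) (Neutral_Dict : List (String × Int)) (vocabulary : List String) (dataset : List String), Dom_word_class_count Positive_Dict Negative_Dict Neutral_Dict vocabulary dataset → Spec_word_class_count Positive_Dict Negative_Dict Neutral_Dict vocabulary dataset (word_class_count Positive_Dict Negative_Dict Neutral_Dict vocabulary dataset)

-- ===== LEMMAS AND PROOFS =====

-- the words one sentence contributes to class `sym`
def wccSW (sym : String) (s : String) : List String :=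
  if (PySem.Str.split₀ s).getLast? = some sym then
    ((PySem.Str.split₀ s).map wccStrip).filter (fun w => w ≠ sym)
  else []

-- A's increment in normal form
theorem wccIncr_eq (d : PySem.Dict String Int) (w : String) :
    wccIncr d w = d.insert w (d.getD w 0 + 1) := by
  unfold wccIncr
  by_cases h : d.contains w = false
  · simp [h, PySem.Dict.getD_of_not_contains _ _ h]
  · simp [h]

-- B's tally is a fold of A's increment
theorem wccTally_eq_incr : ∀ (ws : List String) (d : PySem.Dict String Int),
    wccTally d ws = ws.foldl wccIncr d := by
  intro ws
  induction ws with
  | nil => intro d; rfl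
  | cons w ws ih =>
    intro d
    show wccTally (d.insert w (d.getD w 0 + 1)) ws = _
    rw [ih, List.foldl_cons, wccIncr_eq]

-- B's staged collection is the concatenation of the per-sentence contributions
theorem wccWordsFor_eq_flatMap (sym : String) (dataset : List String) :
    wccWordsFor sym dataset = dataset.flatMap (wccSW sym) := by
  unfold wccWordsFor
  have hfun : (fun (collected : List String) (sentence : String) =>
      let toks := PySem.Str.split₀ sentence
      if toks ≠ [] ∧ PySem.List.pyGet? toks (-1) = some sym then
        collected ++ toks.map wccStrip
      else collected)
    = fun (collected : List String) (sentence : String) =>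
      collected ++
        (if (PySem.Str.split₀ sentence) ≠ [] ∧
            PySem.List.pyGet? (PySem.Str.split₀ sentence) (-1) = some sym then
          (PySem.Str.split₀ sentence).map wccStrip
        else []) := by
    funext collected sentence
    by_cases h : (PySem.Str.split₀ sentence) ≠ [] ∧
        PySem.List.pyGet? (PySem.Str.split₀ sentence) (-1) = some sym
    · simp [h]
    · simp [h]
  rw [hfun, PySem.List.foldl_append_eq_flatMap]
  rw [List.nil_append, List.filter_flatMap]
  apply List.flatMap_congr
  intro s _
  unfold wccSW
  rw [PySem.List.pyGet?_neg_one]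
  by_cases h : (PySem.Str.split₀ s).getLast? = some sym
  · have hne : PySem.Str.split₀ s ≠ [] := by
      intro hnil; rw [hnil] at h; simp at h
    simp [h, hne]
  · simp [h]

-- the conditional word loop over a sentence = A's increment folded over the filtered strip
theorem wcc_cond_fold (sym : String) : ∀ (toks : List String) (d : PySem.Dict String Int),
    toks.foldl (fun d w0 => if wccStrip w0 ≠ sym then wccIncr d (wccStrip w0) else d) d
    = ((toks.map wccStrip).filter (fun w => w ≠ sym)).foldl wccIncr d := by
  intro toks
  induction toks with
  | nil =>
    intro d
    rw [List.foldl_nil, List.map_nil, List.filter_nil, List.foldl_nil]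
  | cons t toks ih =>
    intro d
    rw [List.foldl_cons, List.map_cons, List.filter_cons]
    by_cases h : wccStrip t = sym
    · rw [if_neg (by simp [h]), if_neg (by simp [h])]
      exact ih d
    · rw [if_pos (by simp [h]), if_pos (by simp [h]), List.foldl_cons]
      exact ih _

-- folds that touch only one component of the state triple
theorem wcc_fold_fst (g : PySem.Dict String Int → String → PySem.Dict String Int) :
    ∀ (l : List String) (st : PySem.Dict String Int × PySem.Dict String Int × PySem.Dict String Int),
      l.foldl (fun t w => (g t.1 w, t.2.1, t.2.2)) st = (l.foldl g st.1, st.2.1, st.2.2) := by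
  intro l
  induction l with
  | nil => intro st; rfl
  | cons w l ih => intro st; rw [List.foldl_cons, List.foldl_cons, ih]

theorem wcc_fold_snd (g : PySem.Dict String Int → String → PySem.Dict String Int) :
    ∀ (l : List String) (st : PySem.Dict String Int × PySem.Dict String Int × PySem.Dict String Int),
      l.foldl (fun t w => (t.1, g t.2.1 w, t.2.2)) st = (st.1, l.foldl g st.2.1, st.2.2) := by
  intro l
  induction l with
  | nil => intro st; rfl
  | cons w l ih => intro st; rw [List.foldl_cons, List.foldl_cons, ih]

theorem wcc_fold_trd (g : PySem.Dict String Int → String → PySem.Dict String Int) :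
    ∀ (l : List String) (st : PySem.Dict String Int × PySem.Dict String Int × PySem.Dict String Int),
      l.foldl (fun t w => (t.1, t.2.1, g t.2.2 w)) st = (st.1, st.2.1, l.foldl g st.2.2) := by
  intro l
  induction l with
  | nil => intro st; rfl
  | cons w l ih => intro st; rw [List.foldl_cons, List.foldl_cons, ih]

theorem wcc_fold_id :
    ∀ (l : List String) (st : PySem.Dict String Int × PySem.Dict String Int × PySem.Dict String Int),
      l.foldl (fun t (_ : String) => t) st = st := by
  intro l
  induction l with
  | nil => intro st; rfl
  | cons w l ih => intro st; rw [List.foldl_cons, ih]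

-- classes[len(classes)-1] is the last element
theorem wcc_last (l : List String) (h : l ≠ []) :
    PySem.List.pyGet? l ((l.length : Int) - 1) = l.getLast? := by
  have hlen : 1 ≤ l.length := List.length_pos_of_ne_nil h
  have h1 : ((l.length : Int) - 1) = ((l.length - 1 : Nat) : Int) := by push_cast [hlen]; ring
  rw [h1, PySem.List.pyGet?_natCast, List.getLast?_eq_getElem?]

-- one sentence of A contributes exactly its per-class word lists
theorem wcc_sentence (s : String)
    (st : PySem.Dict String Int × PySem.Dict String Int × PySem.Dict String Int) :
    (PySem.Str.split₀ s).foldl (wccStepA (PySem.Str.split₀ s)) st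
    = ((wccSW "+" s).foldl wccIncr st.1,
       (wccSW "-" s).foldl wccIncr st.2.1,
       (wccSW "0" s).foldl wccIncr st.2.2) := by
  cases htoks : (PySem.Str.split₀ s).getLast? with
  | none =>
    have hnil : PySem.Str.split₀ s = [] := List.getLast?_eq_none_iff.mp htoks
    rw [hnil]
    unfold wccSW
    rw [htoks]
    simp
  | some lbl =>
    have hne : PySem.Str.split₀ s ≠ [] := by
      intro h; rw [h] at htoks; simp at htoks
    have hlast : PySem.List.pyGet? (PySem.Str.split₀ s)
        (((PySem.Str.split₀ s).length : Int) - 1) = some lbl :=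
      (wcc_last _ hne).trans htoks
    unfold wccSW
    rw [htoks]
    by_cases h1 : lbl = "+"
    · subst h1
      have hstep : wccStepA (PySem.Str.split₀ s) = fun t w0 =>
          ((if wccStrip w0 ≠ "+" then wccIncr t.1 (wccStrip w0) else t.1), t.2.1, t.2.2) := by
        funext t w0
        unfold wccStepA
        simp only [hlast]
        by_cases hw : wccStrip w0 = "+" <;> simp [hw]
      rw [hstep,
        wcc_fold_fst (fun d w0 => if wccStrip w0 ≠ "+" then wccIncr d (wccStrip w0) else d),
        wcc_cond_fold]
      simp
    · by_cases h2 : lbl = "-"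
      · subst h2
        have hstep : wccStepA (PySem.Str.split₀ s) = fun t w0 =>
            (t.1, (if wccStrip w0 ≠ "-" then wccIncr t.2.1 (wccStrip w0) else t.2.1), t.2.2) := by
          funext t w0
          unfold wccStepA
          simp only [hlast]
          by_cases hw : wccStrip w0 = "-" <;> simp [hw]
        rw [hstep,
          wcc_fold_snd (fun d w0 => if wccStrip w0 ≠ "-" then wccIncr d (wccStrip w0) else d),
          wcc_cond_fold]
        simp
      · by_cases h3 : lbl = "0"
        · subst h3
          have hstep : wccStepA (PySem.Str.split₀ s) = fun t w0 =>
              (t.1, t.2.1, (if wccStrip w0 ≠ "0" then wccIncr t.2.2 (wccStrip w0) else t.2.2)) := by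
            funext t w0
            unfold wccStepA
            simp only [hlast]
            by_cases hw : wccStrip w0 = "0" <;> simp [hw]
          rw [hstep,
            wcc_fold_trd (fun d w0 => if wccStrip w0 ≠ "0" then wccIncr d (wccStrip w0) else d),
            wcc_cond_fold]
          simp
        · have hstep : wccStepA (PySem.Str.split₀ s) = fun t (_ : String) => t := by
            funext t w0
            unfold wccStepA
            simp only [hlast]
            simp [h1, h2, h3]
          rw [hstep, wcc_fold_id]
          simp [h1, h2, h3]

-- A's interleaved dataset pass decomposes into three independent per-class folds
theorem wcc_main : ∀ (ds : List String)
    (st : PySem.Dict String Int × PySem.Dict String Int × PySem.Dict String Int),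
    ds.foldl (fun st sentence =>
        (PySem.Str.split₀ sentence).foldl (wccStepA (PySem.Str.split₀ sentence)) st) st
    = ((ds.flatMap (wccSW "+")).foldl wccIncr st.1,
       (ds.flatMap (wccSW "-")).foldl wccIncr st.2.1,
       (ds.flatMap (wccSW "0")).foldl wccIncr st.2.2) := by
  intro ds
  induction ds with
  | nil => intro st; rfl
  | cons s ds ih =>
    intro st
    rw [List.foldl_cons, wcc_sentence, ih]
    simp [List.foldl_append]

-- ===== VERDICT (by name: the statement is the Claim_ definition above) =====
theorem word_class_count_spec : Claim_equal_word_class_count := by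
  unfold Claim_equal_word_class_count
  intro P N Z vocabulary dataset _
  unfold Spec_word_class_count word_class_count word_class_count_alt
  rw [wcc_main, wccWordsFor_eq_flatMap, wccWordsFor_eq_flatMap, wccWordsFor_eq_flatMap,
      wccTally_eq_incr, wccTally_eq_incr, wccTally_eq_incr]
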